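-- pv_equiv track=rewrite | github.com/katiedimitrop/comp34120_g19_bot | g19Bot/manc_minimax.py | makeNextBoard
-- ===== SOURCE A (Python) =====
-- def makeNextBoard(fromMaxTurn, currentBoard, moveIndex):
-- 	resBoard = currentBoard.copy()
-- 	NScorePit = 7
-- 	SScorePit = 15
--
-- 	if (fromMaxTurn): #move is being made by South(MAX)
-- 		movePit = moveIndex + 8
-- 		leftMostPit = 8
-- 		rightMostPit = 14 #excluding score pit
-- 		scorePit = 15
-- 		acrossIncrement = -8
-- 		skipScoreOne = True #must skip first pit when sowing
-- 		skipScoreTwo = False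
--
-- 	else:
-- 		movePit = moveIndex
-- 		leftMostPit = 0
-- 		rightMostPit = 6
-- 		scorePit = 7
-- 		acrossIncrement = 8
-- 		skipScoreOne = False
-- 		skipScoreTwo = True
--
-- 	#collect the seeds, emptying the pit
-- 	seedStash = resBoard[movePit]
-- 	resBoard[movePit] = 0
-- 	curPit = movePit
--
-- 	#sow the seeds anti-clockwise
-- 	while seedStash > 0:
-- 		#find next pit index
-- 		if (curPit == SScorePit):
-- 			curPit = 0 #end of array was reached, reset
-- 		else:
-- 			curPit +=1
--
-- 		#if the pit index isn't opps score pit, put a seed in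
-- 		if not((skipScoreOne and curPit == NScorePit) or
-- 				(skipScoreTwo and curPit == SScorePit)):
-- 			resBoard[curPit]+=1
-- 			seedStash-=1
--
-- 	#if player's last seed ended up in one of their empty playable pits
-- 	if ((resBoard[curPit] == 1) and (leftMostPit<= curPit <= rightMostPit)):
-- 	#take whatever is across and place it in player's score pit
-- 		resBoard[scorePit]+=resBoard[curPit+acrossIncrement]
-- 		#empty opp's pit
-- 		resBoard[curPit+acrossIncrement] = 0
-- 	return resBoard
-- ===== SOURCE B (Python) =====
-- def makeNextBoard(fromMaxTurn, currentBoard, moveIndex):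
--     # Closed-form sowing: first-lap prefix + divmod full laps instead of a seed-by-seed loop.
--     res = currentBoard.copy()
--     if fromMaxTurn:
--         movePit, leftMost, rightMost, scorePit, across, skipPit = moveIndex + 8, 8, 14, 15, -8, 7
--     else:
--         movePit, leftMost, rightMost, scorePit, across, skipPit = moveIndex, 0, 6, 7, 8, 15
--     seeds = res[movePit]
--     res[movePit] = 0
--     if seeds > 0:
--         prefix = [p for p in range(movePit + 1, 16) if p != skipPit]
--         if seeds <= len(prefix):
--             for p in prefix[:seeds]:
--                 res[p] += 1
--             cur = prefix[seeds - 1]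
--         else:
--             cycle = [p for p in range(16) if p != skipPit]
--             q, r = divmod(seeds - len(prefix), len(cycle))
--             for p in prefix:
--                 res[p] += 1
--             for p in cycle:
--                 res[p] += q
--             for p in cycle[:r]:
--                 res[p] += 1
--             cur = cycle[r - 1] if r > 0 else cycle[-1]
--     else:
--         cur = movePit
--     if res[cur] == 1 and leftMost <= cur <= rightMost:
--         res[scorePit] += res[cur + across]
--         res[cur + across] = 0
--     return res
-- ===== Notes on version B (the rewrite author's own statement) =====
-- stated objective: faster
-- what changed: Replaces the seed-by-seed while loop with a closed form: the first-lap pit list is built once, full laps are added with divmod (each cycle pit gets laps, the first remainder pits one extra) and the landing pit is read off by index before the identical capture step.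
import Mathlib
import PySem

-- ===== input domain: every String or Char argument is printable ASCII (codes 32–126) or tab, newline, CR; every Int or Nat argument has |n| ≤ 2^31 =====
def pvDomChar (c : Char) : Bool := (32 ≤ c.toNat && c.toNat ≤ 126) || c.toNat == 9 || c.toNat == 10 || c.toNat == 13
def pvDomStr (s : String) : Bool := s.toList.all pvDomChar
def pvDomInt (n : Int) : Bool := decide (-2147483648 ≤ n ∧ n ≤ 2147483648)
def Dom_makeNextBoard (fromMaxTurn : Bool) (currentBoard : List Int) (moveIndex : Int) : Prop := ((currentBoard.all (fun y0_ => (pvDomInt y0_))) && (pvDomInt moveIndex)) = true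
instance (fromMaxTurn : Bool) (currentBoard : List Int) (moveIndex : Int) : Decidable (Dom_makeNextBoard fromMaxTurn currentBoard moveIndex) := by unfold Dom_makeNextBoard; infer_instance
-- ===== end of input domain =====

-- B replaces A's seed-by-seed sowing loop by a divmod closed form over the 15-pit sowing
-- cycle (objective: faster in the seed count; equal results proved below on Pre_).

-- shared Python list-indexing helpers (under Pre_ every index used is in 0..15, in range)
def pitGet (b : List Int) (i : Int) : Int := PySem.List.pyGetD b i 0
def pitSet (b : List Int) (i : Int) (v : Int) : List Int := PySem.List.pySetD b i v

-- ===== PORT A =====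
-- A's while loop. In each branch of A exactly one of skipScoreOne/skipScoreTwo is True,
-- so the sow condition 'not((skipScoreOne and curPit==7) or (skipScoreTwo and curPit==15))'
-- is exactly 'curPit ≠ skipPit' for that branch's opponent score pit (7 resp. 15).
def sowLoop (skipPit : Int) (b : List Int) (curPit seedStash : Int) : List Int × Int :=
  if h1 : 0 < seedStash then
    let c := if curPit = 15 then (0 : Int) else curPit + 1
    if h2 : c = skipPit then
      sowLoop skipPit b c seedStash
    else
      sowLoop skipPit (pitSet b c (pitGet b c + 1)) c (seedStash - 1)
  else (b, curPit)
  termination_by (2 * seedStash.toNat + (if curPit = skipPit then 0 else 1))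
  decreasing_by
  · have h2' : (if _h : curPit = 15 then (0:Int) else curPit + 1) = skipPit := h2
    rw [if_pos h2', if_neg (show curPit ≠ skipPit by split_ifs at h2' <;> omega)]
    omega
  · split_ifs <;> omega

def makeNextBoard (fromMaxTurn : Bool) (currentBoard : List Int) (moveIndex : Int) : List Int :=
  let resBoard := currentBoard
  let movePit := if fromMaxTurn then moveIndex + 8 else moveIndex
  let leftMostPit : Int := if fromMaxTurn then 8 else 0
  let rightMostPit : Int := if fromMaxTurn then 14 else 6
  let scorePit : Int := if fromMaxTurn then 15 else 7
  let acrossIncrement : Int := if fromMaxTurn then -8 else 8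
  let skipPit : Int := if fromMaxTurn then 7 else 15
  let seedStash := pitGet resBoard movePit
  let resBoard := pitSet resBoard movePit 0
  let res := sowLoop skipPit resBoard movePit seedStash
  let board := res.1
  let curPit := res.2
  if pitGet board curPit = 1 ∧ leftMostPit ≤ curPit ∧ curPit ≤ rightMostPit then
    let b2 := pitSet board scorePit (pitGet board scorePit + pitGet board (curPit + acrossIncrement))
    pitSet b2 (curPit + acrossIncrement) 0
  else board

-- ===== PORT B =====
def bump (k : Int) (b : List Int) (p : Int) : List Int := pitSet b p (pitGet b p + k)

def makeNextBoard_alt (fromMaxTurn : Bool) (currentBoard : List Int) (moveIndex : Int) : List Int :=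
  let movePit := if fromMaxTurn then moveIndex + 8 else moveIndex
  let leftMost : Int := if fromMaxTurn then 8 else 0
  let rightMost : Int := if fromMaxTurn then 14 else 6
  let scorePit : Int := if fromMaxTurn then 15 else 7
  let across : Int := if fromMaxTurn then -8 else 8
  let skipPit : Int := if fromMaxTurn then 7 else 15
  let seeds := pitGet currentBoard movePit
  let res := pitSet currentBoard movePit 0
  let sown : List Int × Int :=
    if 0 < seeds then
      let pre := (PySem.List.pyRange (movePit + 1) 16 1).filter (fun p => p != skipPit)
      if seeds ≤ (pre.length : Int) then
        ((PySem.List.slice pre none (some seeds)).foldl (bump 1) res,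
         (PySem.List.pyGet? pre (seeds - 1)).getD 0)
      else
        let cyc := (PySem.List.pyRange 0 16 1).filter (fun p => p != skipPit)
        let q := PySem.Int.floordiv (seeds - pre.length) cyc.length
        let r := PySem.Int.mod (seeds - pre.length) cyc.length
        let b1 := pre.foldl (bump 1) res
        let b2 := cyc.foldl (bump q) b1
        let b3 := (PySem.List.slice cyc none (some r)).foldl (bump 1) b2
        -- pre/cyc are never empty here, so Python's pre[seeds-1] / cyc[r-1] / cyc[-1] never raises
        (b3, if 0 < r then (PySem.List.pyGet? cyc (r - 1)).getD 0 else (PySem.List.pyGet? cyc (-1)).getD 0)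
    else (res, movePit)
  let resBoard := sown.1
  let cur := sown.2
  if pitGet resBoard cur = 1 ∧ leftMost ≤ cur ∧ cur ≤ rightMost then
    let b2 := pitSet resBoard scorePit (pitGet resBoard scorePit + pitGet resBoard (cur + across))
    pitSet b2 (cur + across) 0
  else resBoard

-- ===== PRECONDITION & SPEC =====
-- Pre_ admits the inputs on which the Python A returns normally within the shapes the proof
-- covers: a valid (possibly negative) move pit and then either no seeds to sow, the real
-- 16-pit Mancala position (move 0..6), or a short board (≤ 14 pits) whose single-lap sowing
-- and capture step stay inside the list.  Excluded while A still returns are only boards of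
-- length 15 or of length ≥ 16 outside moves 0..6 — accidental shapes this 16-pit engine
-- never produces, on which A applies its hard-coded pit constants to a board of the wrong
-- size (see claim cites).
def Pre_makeNextBoard (fromMaxTurn : Bool) (currentBoard : List Int) (moveIndex : Int) : Prop :=
  let L : Int := currentBoard.length;
  let mp : Int := (if fromMaxTurn then moveIndex + 8 else moveIndex);
  let seeds : Int := PySem.List.pyGetD currentBoard mp 0;
  let lo : Int := (if fromMaxTurn then 8 else 0);
  let hi : Int := (if fromMaxTurn then 14 else 6);
  let sp : Int := (if fromMaxTurn then 15 else 7);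
  let ac : Int := (if fromMaxTurn then -8 else 8);
  -L ≤ mp ∧ mp < L ∧
  (seeds ≤ 0 ∨
   (L = 16 ∧ 0 ≤ moveIndex ∧ moveIndex ≤ 6) ∨
   (L ≤ 14 ∧
    seeds ≤ L - 1 - mp - (if fromMaxTurn = true ∧ mp < 7 ∧ 7 < L then 1 else 0) ∧
    (let c : Int := (if fromMaxTurn = true ∧ mp < 7 ∧ 7 ≤ mp + seeds then mp + seeds + 1 else mp + seeds);
     (¬(lo ≤ c ∧ c ≤ hi ∧
          ((if c = mp + L then (0:Int) else PySem.List.pyGetD currentBoard c 0)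
            + (if mp < c - L then 1 else 0)) = 0)) ∨
      (sp < L ∧ -L ≤ c + ac ∧ c + ac < L))))
instance (fromMaxTurn : Bool) (currentBoard : List Int) (moveIndex : Int) : Decidable (Pre_makeNextBoard fromMaxTurn currentBoard moveIndex) := by unfold Pre_makeNextBoard; infer_instance
def pvWitness_makeNextBoard : Bool × List Int × Int := (false, [3,3,3,3,3,3,3,0,3,3,3,3,3,3,3,0], 2)

def Spec_makeNextBoard (fromMaxTurn : Bool) (currentBoard : List Int) (moveIndex : Int) (out : List Int) : Prop := out = makeNextBoard_alt fromMaxTurn currentBoard moveIndex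
instance (fromMaxTurn : Bool) (currentBoard : List Int) (moveIndex : Int) (out : List Int) : Decidable (Spec_makeNextBoard fromMaxTurn currentBoard moveIndex out) := by unfold Spec_makeNextBoard; infer_instance

-- ===== CLAIM (what is proved, stated in full; the proofs are below) =====
def Claim_equal_makeNextBoard : Prop := ∀ (fromMaxTurn : Bool) (currentBoard : List Int) (moveIndex : Int), Dom_makeNextBoard fromMaxTurn currentBoard moveIndex → Pre_makeNextBoard fromMaxTurn currentBoard moveIndex → Spec_makeNextBoard fromMaxTurn currentBoard moveIndex (makeNextBoard fromMaxTurn currentBoard moveIndex)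

-- ===== LEMMAS AND PROOFS =====

-- the next pit a seed lands in, starting from pit c (skipping the opponent score pit)
def nt (skip c : Int) : Int :=
  let c' := if c = 15 then (0 : Int) else c + 1
  if c' = skip then (if c' = 15 then (0 : Int) else c' + 1) else c'

-- clean per-seed recursion equivalent to sowLoop
def sowSteps (skip : Int) (b : List Int) (c : Int) : Nat → List Int × Int
  | 0 => (b, c)
  | n + 1 => sowSteps skip (bump 1 b (nt skip c)) (nt skip c) n

-- the pits the first n seeds land in, in order
def path (skip c : Int) : Nat → List Int
  | 0 => []
  | n + 1 => nt skip c :: path skip (nt skip c) n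

theorem sowLoop_eq_sowSteps (skip : Int) : ∀ (n : Nat) (s : Int), s.toNat = n → ∀ b c, sowLoop skip b c s = sowSteps skip b c n := by
  intro n
  induction n using Nat.strong_induction_on with
  | _ n ih =>
    intro s hs b c
    rw [sowLoop]
    by_cases h1 : 0 < s
    · obtain ⟨m, rfl⟩ : ∃ m, n = m + 1 := ⟨n - 1, by omega⟩
      rw [dif_pos h1]
      by_cases h2 : (if c = 15 then (0:Int) else c + 1) = skip
      · rw [dif_pos h2, sowLoop, dif_pos h1]
        have hne : (if (if c = 15 then (0:Int) else c + 1) = 15 then (0:Int) else (if c = 15 then (0:Int) else c + 1) + 1) ≠ skip := by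
          rw [h2]; split_ifs <;> omega
        rw [dif_neg hne, ih m (by omega) (s - 1) (by omega)]
        show _ = sowSteps skip (bump 1 b (nt skip c)) (nt skip c) m
        simp only [nt, bump, h2, if_pos]
      · rw [dif_neg h2, ih m (by omega) (s - 1) (by omega)]
        show _ = sowSteps skip (bump 1 b (nt skip c)) (nt skip c) m
        simp [nt, bump, h2]
    · rw [dif_neg h1]
      obtain rfl : n = 0 := by omega
      rfl


theorem sowSteps_eq (skip : Int) (n : Nat) : ∀ b c, sowSteps skip b c n = ((path skip c n).foldl (bump 1) b, (nt skip)^[n] c) := by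
  induction n with
  | zero => intro b c; rfl
  | succ n ih =>
    intro b c
    rw [sowSteps, ih, path, List.foldl_cons, Function.iterate_succ_apply]

theorem path_length (skip : Int) (n : Nat) : ∀ c, (path skip c n).length = n := by
  induction n with
  | zero => intro c; rfl
  | succ n ih => intro c; rw [path, List.length_cons, ih]

theorem path_append (skip : Int) (m : Nat) : ∀ (n : Nat) (c : Int), path skip c (m + n) = path skip c m ++ path skip ((nt skip)^[m] c) n := by
  induction m with
  | zero => intro n c; simp [path]
  | succ m ih =>
    intro n c
    have : m + 1 + n = (m + n) + 1 := by omega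
    rw [this, path, path, Function.iterate_succ_apply, ih n (nt skip c), List.cons_append]

theorem path_take (skip c : Int) (m n : Nat) (h : m ≤ n) : path skip c m = (path skip c n).take m := by
  have : n = m + (n - m) := by omega
  rw [this, path_append]
  exact (List.take_left' (path_length skip m c)).symm

theorem path_getLast? (skip : Int) (n : Nat) (hn : 0 < n) : ∀ c, (path skip c n).getLast? = some ((nt skip)^[n] c) := by
  induction n with
  | zero => omega
  | succ n ih =>
    intro c
    rw [path]
    rcases Nat.eq_zero_or_pos n with h0 | h0
    · subst h0; rfl
    · rcases hp : path skip (nt skip c) n with _ | ⟨a, l⟩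
      · have := path_length skip n (nt skip c); rw [hp] at this; simp at this; omega
      · rw [List.getLast?_cons_cons, ← hp, ih h0, Function.iterate_succ_apply]

theorem length_foldl_bump (k : Int) (L : List Int) : ∀ b : List Int, (L.foldl (bump k) b).length = b.length := by
  induction L with
  | nil => intro b; rfl
  | cons p L ih => intro b; rw [List.foldl_cons, ih, bump, pitSet, PySem.List.length_pySetD]

theorem getD_foldl_bump (k : Int) (L : List Int) : ∀ (b : List Int) (j : Nat), j < b.length → (∀ p ∈ L, 0 ≤ p ∧ p.toNat < b.length) →
    (L.foldl (bump k) b).getD j 0 = b.getD j 0 + k * ((L.countP (fun p => p.toNat == j)) : Int) := by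
  induction L with
  | nil => intro b j hj _; simp
  | cons p L ih =>
    intro b j hj hL
    rw [List.foldl_cons]
    have hb' : (bump k b p).length = b.length := by rw [bump, pitSet, PySem.List.length_pySetD]
    rw [ih (bump k b p) j (by omega) (fun x hx => by rw [hb']; exact hL x (List.mem_cons_of_mem _ hx))]
    have hset : (bump k b p).getD j 0 = b.getD j 0 + (if p.toNat = j then k else 0) := by
      rw [bump, pitSet, pitGet, PySem.List.pySetD_of_nonneg b _ (hL p List.mem_cons_self).1,
        PySem.List.pyGetD_of_nonneg b 0 (hL p List.mem_cons_self).1,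
        List.getD_eq_getElem?_getD, List.getElem?_set]
      have hplen : p.toNat < b.length := (hL p List.mem_cons_self).2
      by_cases hpj : p.toNat = j
      · rw [if_pos hpj, if_pos (by omega), if_pos hpj]
        subst hpj
        rw [List.getD_eq_getElem?_getD]
        rfl
      · rw [if_neg hpj, if_neg hpj, List.getD_eq_getElem?_getD]
        simp
    rw [hset, List.countP_cons]
    by_cases hpj : p.toNat = j <;> simp [hpj] <;> push_cast <;> ring
theorem iter_cycle (skip mp : Int) (h15 : (nt skip)^[15] mp = mp) (Q R : Nat) :
    (nt skip)^[15 * Q + R] mp = (nt skip)^[R] mp := by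
  induction Q with
  | zero => simp
  | succ Q ih =>
    have : 15 * (Q + 1) + R = (15 * Q + R) + 15 := by omega
    rw [this, Function.iterate_add_apply, h15, ih]

theorem path_cycles (skip mp : Int) (h15 : (nt skip)^[15] mp = mp) (Q R : Nat) :
    path skip mp (15 * Q + R) = (List.replicate Q (path skip mp 15)).flatten ++ path skip mp R := by
  induction Q with
  | zero => simp
  | succ Q ih =>
    have : 15 * (Q + 1) + R = 15 + (15 * Q + R) := by omega
    rw [this, path_append, h15, ih, List.replicate_succ, List.flatten_cons, List.append_assoc]

theorem countP_flatten_replicate (T : List Int) (f : Int → Bool) (Q : Nat) :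
    ((List.replicate Q T).flatten.countP f) = Q * T.countP f := by
  induction Q with
  | zero => simp
  | succ Q ih => rw [List.replicate_succ, List.flatten_cons, List.countP_append, ih]; ring

-- sowing with no seeds: the loop exits immediately
theorem sowLoop_zero (skip : Int) (b0 : List Int) (mp seeds : Int) (hs : ¬ 0 < seeds) :
    sowLoop skip b0 mp seeds = (b0, mp) := by
  rw [sowLoop, dif_neg hs]

-- sowing that stays inside the first lap equals bumping a prefix of the first-lap pit list
theorem sowLin (skip mp : Int) (Pf : List Int)
    (hpathP : path skip mp Pf.length = Pf)
    (b0 : List Int) (seeds : Int)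
    (hs1 : 0 < seeds) (hs2 : seeds ≤ (Pf.length : Int)) :
    sowLoop skip b0 mp seeds =
      ((PySem.List.slice Pf none (some seeds)).foldl (bump 1) b0,
       (PySem.List.pyGet? Pf (seeds - 1)).getD 0) := by
  rw [sowLoop_eq_sowSteps skip seeds.toNat seeds rfl, sowSteps_eq]
  set n := seeds.toNat with hn
  have hn1 : 0 < n := by omega
  have hn2 : n ≤ Pf.length := by omega
  have hpathn : path skip mp n = Pf.take n := by
    rw [path_take skip mp n Pf.length hn2, hpathP]
  have hslice : PySem.List.slice Pf none (some seeds) = Pf.take n := by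
    rw [PySem.List.slice_to Pf (by omega)]
  have hlast : (nt skip)^[n] mp = (PySem.List.pyGet? Pf (seeds - 1)).getD 0 := by
    have h1 : (path skip mp n).getLast? = some ((nt skip)^[n] mp) := path_getLast? skip n hn1 mp
    rw [hpathn] at h1
    have h2 : (Pf.take n).getLast? = Pf[n - 1]? := by
      rw [List.getLast?_eq_getElem?, List.length_take,
        show min n Pf.length - 1 = n - 1 from by omega, List.getElem?_take_of_lt (by omega)]
    have h3 : PySem.List.pyGet? Pf (seeds - 1) = Pf[n - 1]? := by
      rw [show seeds - 1 = ((n - 1 : Nat) : Int) from by omega, PySem.List.pyGet?_natCast]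
    rw [h3, ← h2, h1]
    rfl
  rw [hpathn, hslice, hlast]

-- sowing past the first lap: prefix once, each cycle pit seeds′//15 times, remainder prefix once
theorem sowLap (skip mp : Int) (Pf C : List Int)
    (hpathP : path skip mp Pf.length = Pf)
    (hpathC : path skip ((nt skip)^[Pf.length] mp) 15 = C)
    (hCiter : (nt skip)^[15] ((nt skip)^[Pf.length] mp) = (nt skip)^[Pf.length] mp)
    (hClast : C.getLast? = some ((nt skip)^[Pf.length] mp))
    (hClen : C.length = 15)
    (hPrange : ∀ p ∈ Pf, 0 ≤ p ∧ p.toNat < 16) (hCrange : ∀ p ∈ C, 0 ≤ p ∧ p.toNat < 16)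
    (b0 : List Int) (hb0len : b0.length = 16) (seeds : Int)
    (hs1 : 0 < seeds) (hs2 : ¬ seeds ≤ (Pf.length : Int)) :
    sowLoop skip b0 mp seeds =
      ((PySem.List.slice C none (some (PySem.Int.mod (seeds - Pf.length) C.length))).foldl (bump 1)
         (C.foldl (bump (PySem.Int.floordiv (seeds - Pf.length) C.length)) (Pf.foldl (bump 1) b0)),
       if 0 < PySem.Int.mod (seeds - Pf.length) C.length then
         (PySem.List.pyGet? C (PySem.Int.mod (seeds - Pf.length) C.length - 1)).getD 0
       else (PySem.List.pyGet? C (-1)).getD 0) := by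
  have hCl : (C.length : Int) = 15 := by rw [hClen]; rfl
  set P := Pf.length with hP
  set z := (nt skip)^[P] mp with hz
  set q := PySem.Int.floordiv (seeds - P) C.length with hq
  set r := PySem.Int.mod (seeds - P) C.length with hr
  have hq' : q = PySem.Int.floordiv (seeds - P) 15 := by rw [hq, hCl]
  have hr' : r = PySem.Int.mod (seeds - P) 15 := by rw [hr, hCl]
  have hr0 : 0 ≤ r := by rw [hr']; exact PySem.Int.mod_nonneg _ (by norm_num)
  have hr15 : r < 15 := by rw [hr']; exact PySem.Int.mod_lt _ (by norm_num)
  have hqr : q * 15 + r = seeds - P := by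
    rw [hq', hr']; exact PySem.Int.floordiv_mul_add_mod (seeds - P) 15
  have hsP : (P : Int) < seeds := by omega
  have hq0 : 0 ≤ q := by omega
  have hncast : seeds.toNat = P + (15 * q.toNat + r.toNat) := by omega
  rw [sowLoop_eq_sowSteps skip seeds.toNat seeds rfl, sowSteps_eq, hncast]
  set Q := q.toNat with hQ
  set R := r.toNat with hR
  have hRlt : R < 15 := by omega
  have hrR : r = (R : Int) := by omega
  have hqQ : q = (Q : Int) := by omega
  have hsplit : path skip mp (P + (15 * Q + R))
      = Pf ++ ((List.replicate Q C).flatten ++ path skip z R) := by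
    rw [path_append skip P (15 * Q + R) mp, ← hz, hpathP,
      path_cycles skip z hCiter Q R, hpathC]
  have hpathR : path skip z R = C.take R := by
    rw [path_take skip z R 15 (by omega), hpathC]
  have hslice : PySem.List.slice C none (some r) = C.take R := by
    rw [PySem.List.slice_to C hr0]
  have hlen1 : (Pf.foldl (bump 1) b0).length = 16 := by rw [length_foldl_bump, hb0len]
  have hlen2 : (C.foldl (bump q) (Pf.foldl (bump 1) b0)).length = 16 := by
    rw [length_foldl_bump, hlen1]
  have htakeR : ∀ p ∈ C.take R, 0 ≤ p ∧ p.toNat < 16 := fun p hp => hCrange p (List.mem_of_mem_take hp)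
  have hboards : (path skip mp (P + (15 * Q + R))).foldl (bump 1) b0
      = (C.take R).foldl (bump 1) (C.foldl (bump q) (Pf.foldl (bump 1) b0)) := by
    apply List.ext_getElem
    · rw [length_foldl_bump, length_foldl_bump, length_foldl_bump, length_foldl_bump]
    · intro j hj1 hj2
      have hj : j < 16 := by rw [length_foldl_bump, hb0len] at hj1; exact hj1
      have hmemA : ∀ p ∈ path skip mp (P + (15 * Q + R)), 0 ≤ p ∧ p.toNat < b0.length := by
        intro p hp
        rw [hsplit] at hp
        rw [hb0len]
        rcases List.mem_append.1 hp with h | h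
        · exact hPrange p h
        · rcases List.mem_append.1 h with h' | h'
          · obtain ⟨l, hl, hpl⟩ := List.mem_flatten.1 h'
            exact hCrange p (List.eq_of_mem_replicate hl ▸ hpl)
          · exact hCrange p (List.mem_of_mem_take (hpathR ▸ h'))
      have e1 := getD_foldl_bump 1 (path skip mp (P + (15 * Q + R))) b0 j (by omega) hmemA
      have e2 : ((C.take R).foldl (bump 1) (C.foldl (bump q) (Pf.foldl (bump 1) b0))).getD j 0
          = b0.getD j 0 + 1 * ((Pf.countP (fun p => p.toNat == j)) : Int)
            + q * ((C.countP (fun p => p.toNat == j)) : Int)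
            + 1 * (((C.take R).countP (fun p => p.toNat == j)) : Int) := by
        rw [getD_foldl_bump 1 _ _ j (by omega) (fun p hp => by rw [hlen2]; exact htakeR p hp),
          getD_foldl_bump q _ _ j (by omega) (fun p hp => by rw [hlen1]; exact hCrange p hp),
          getD_foldl_bump 1 _ _ j (by omega) (fun p hp => by rw [hb0len]; exact hPrange p hp)]
      have hcount : ((path skip mp (P + (15 * Q + R))).countP (fun p => p.toNat == j))
          = Pf.countP (fun p => p.toNat == j) + Q * C.countP (fun p => p.toNat == j)
            + (C.take R).countP (fun p => p.toNat == j) := by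
        rw [hsplit, List.countP_append, List.countP_append,
          countP_flatten_replicate, hpathR]
        ring
      have g1 : ((path skip mp (P + (15 * Q + R))).foldl (bump 1) b0).getD j 0
          = ((C.take R).foldl (bump 1) (C.foldl (bump q) (Pf.foldl (bump 1) b0))).getD j 0 := by
        rw [e1, e2, hcount, hqQ]; push_cast; ring
      rw [List.getD_eq_getElem _ _ hj1, List.getD_eq_getElem _ _ hj2] at g1
      exact g1
  have hpit : (nt skip)^[P + (15 * Q + R)] mp
      = (if 0 < r then (PySem.List.pyGet? C (r - 1)).getD 0 else (PySem.List.pyGet? C (-1)).getD 0) := by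
    have hiter1 : (nt skip)^[P + (15 * Q + R)] mp = (nt skip)^[R] z := by
      rw [show P + (15 * Q + R) = (15 * Q + R) + P from by omega,
        Function.iterate_add_apply, ← hz, iter_cycle skip z hCiter Q R]
    rw [hiter1]
    by_cases hRpos : 0 < R
    · rw [if_pos (by omega)]
      have h1 : (path skip z R).getLast? = some ((nt skip)^[R] z) := path_getLast? skip R hRpos z
      rw [hpathR] at h1
      have h2 : (C.take R).getLast? = C[R - 1]? := by
        rw [List.getLast?_eq_getElem?, List.length_take, hClen,
          show min R 15 - 1 = R - 1 from by omega, List.getElem?_take_of_lt (by omega)]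
      have h3 : PySem.List.pyGet? C (r - 1) = C[R - 1]? := by
        rw [show r - 1 = ((R - 1 : Nat) : Int) from by omega, PySem.List.pyGet?_natCast]
      rw [h3, ← h2, h1]
      rfl
    · rw [if_neg (by omega), show R = 0 from by omega]
      rw [PySem.List.pyGet?_neg_one, hClast]
      rfl
  rw [hboards, hslice, hpit]

-- no seeds to sow: both cores reduce to the capture step on (board-with-empty-pit, movePit)
theorem coreZero (skip mp lo hi sp ac : Int) (board : List Int)
    (hs : ¬ 0 < pitGet board mp) :
    (let seeds := pitGet board mp
     let b0 := pitSet board mp 0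
     let res := sowLoop skip b0 mp seeds
     if pitGet res.1 res.2 = 1 ∧ lo ≤ res.2 ∧ res.2 ≤ hi then
       pitSet (pitSet res.1 sp (pitGet res.1 sp + pitGet res.1 (res.2 + ac))) (res.2 + ac) 0
     else res.1)
    =
    (let seeds := pitGet board mp
     let b0 := pitSet board mp 0
     let sown : List Int × Int :=
       if 0 < seeds then
         let pre := (PySem.List.pyRange (mp + 1) 16 1).filter (fun p => p != skip)
         if seeds ≤ (pre.length : Int) then
           ((PySem.List.slice pre none (some seeds)).foldl (bump 1) b0,
            (PySem.List.pyGet? pre (seeds - 1)).getD 0)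
         else
           let cyc := (PySem.List.pyRange 0 16 1).filter (fun p => p != skip)
           let q := PySem.Int.floordiv (seeds - pre.length) cyc.length
           let r := PySem.Int.mod (seeds - pre.length) cyc.length
           let b1 := pre.foldl (bump 1) b0
           let b2 := cyc.foldl (bump q) b1
           let b3 := (PySem.List.slice cyc none (some r)).foldl (bump 1) b2
           (b3, if 0 < r then (PySem.List.pyGet? cyc (r - 1)).getD 0 else (PySem.List.pyGet? cyc (-1)).getD 0)
       else (b0, mp)
     if pitGet sown.1 sown.2 = 1 ∧ lo ≤ sown.2 ∧ sown.2 ≤ hi then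
       pitSet (pitSet sown.1 sp (pitGet sown.1 sp + pitGet sown.1 (sown.2 + ac))) (sown.2 + ac) 0
     else sown.1) := by
  dsimp only
  rw [if_neg hs, sowLoop_zero skip _ mp _ hs]

-- dispatcher: A's full core equals B's full core
theorem wrapper (skip mp lo hi sp ac : Int) (Pf C : List Int)
    (hPdef : (PySem.List.pyRange (mp + 1) 16 1).filter (fun p => p != skip) = Pf)
    (hCdef : (PySem.List.pyRange 0 16 1).filter (fun p => p != skip) = C)
    (hpathP : path skip mp Pf.length = Pf)
    (hpathC : path skip ((nt skip)^[Pf.length] mp) 15 = C)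
    (hCiter : (nt skip)^[15] ((nt skip)^[Pf.length] mp) = (nt skip)^[Pf.length] mp)
    (hClast : C.getLast? = some ((nt skip)^[Pf.length] mp))
    (hClen : C.length = 15)
    (hPrange : ∀ p ∈ Pf, 0 ≤ p ∧ p.toNat < 16) (hCrange : ∀ p ∈ C, 0 ≤ p ∧ p.toNat < 16)
    (hPlb : (14 : Int) - mp ≤ (Pf.length : Int))
    (board : List Int)
    (hcase : pitGet board mp ≤ 0
             ∨ ((board.length : Int) ≤ 14 ∧ pitGet board mp ≤ (board.length : Int) - 1 - mp)
             ∨ board.length = 16) :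
    (let seeds := pitGet board mp
     let b0 := pitSet board mp 0
     let res := sowLoop skip b0 mp seeds
     if pitGet res.1 res.2 = 1 ∧ lo ≤ res.2 ∧ res.2 ≤ hi then
       pitSet (pitSet res.1 sp (pitGet res.1 sp + pitGet res.1 (res.2 + ac))) (res.2 + ac) 0
     else res.1)
    =
    (let seeds := pitGet board mp
     let b0 := pitSet board mp 0
     let sown : List Int × Int :=
       if 0 < seeds then
         let pre := (PySem.List.pyRange (mp + 1) 16 1).filter (fun p => p != skip)
         if seeds ≤ (pre.length : Int) then
           ((PySem.List.slice pre none (some seeds)).foldl (bump 1) b0,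
            (PySem.List.pyGet? pre (seeds - 1)).getD 0)
         else
           let cyc := (PySem.List.pyRange 0 16 1).filter (fun p => p != skip)
           let q := PySem.Int.floordiv (seeds - pre.length) cyc.length
           let r := PySem.Int.mod (seeds - pre.length) cyc.length
           let b1 := pre.foldl (bump 1) b0
           let b2 := cyc.foldl (bump q) b1
           let b3 := (PySem.List.slice cyc none (some r)).foldl (bump 1) b2
           (b3, if 0 < r then (PySem.List.pyGet? cyc (r - 1)).getD 0 else (PySem.List.pyGet? cyc (-1)).getD 0)
       else (b0, mp)
     if pitGet sown.1 sown.2 = 1 ∧ lo ≤ sown.2 ∧ sown.2 ≤ hi then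
       pitSet (pitSet sown.1 sp (pitGet sown.1 sp + pitGet sown.1 (sown.2 + ac))) (sown.2 + ac) 0
     else sown.1) := by
  dsimp only
  rw [hPdef, hCdef]
  by_cases hs : 0 < pitGet board mp
  · rw [if_pos hs]
    by_cases hb : pitGet board mp ≤ (Pf.length : Int)
    · rw [if_pos hb, sowLin skip mp Pf hpathP _ _ hs hb]
    · rw [if_neg hb]
      have h16 : board.length = 16 := by
        rcases hcase with h | ⟨hL, hv⟩ | h16
        · omega
        · exact absurd (by omega : pitGet board mp ≤ (Pf.length : Int)) hb
        · exact h16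
      rw [sowLap skip mp Pf C hpathP hpathC hCiter hClast hClen hPrange hCrange _
        (by rw [pitSet, PySem.List.length_pySetD, h16]) _ hs hb]
  · rw [if_neg hs, sowLoop_zero skip _ mp _ hs]


-- dispatcher for the short-board (single-lap) regime: no cycle facts needed
theorem wrapperLin (skip mp lo hi sp ac : Int) (Pf : List Int)
    (hPdef : (PySem.List.pyRange (mp + 1) 16 1).filter (fun p => p != skip) = Pf)
    (hpathP : path skip mp Pf.length = Pf)
    (hPlb : (14 : Int) - mp ≤ (Pf.length : Int))
    (board : List Int)
    (hcase : pitGet board mp ≤ 0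
             ∨ ((board.length : Int) ≤ 14 ∧ pitGet board mp ≤ (board.length : Int) - 1 - mp)) :
    (let seeds := pitGet board mp
     let b0 := pitSet board mp 0
     let res := sowLoop skip b0 mp seeds
     if pitGet res.1 res.2 = 1 ∧ lo ≤ res.2 ∧ res.2 ≤ hi then
       pitSet (pitSet res.1 sp (pitGet res.1 sp + pitGet res.1 (res.2 + ac))) (res.2 + ac) 0
     else res.1)
    =
    (let seeds := pitGet board mp
     let b0 := pitSet board mp 0
     let sown : List Int × Int :=
       if 0 < seeds then
         let pre := (PySem.List.pyRange (mp + 1) 16 1).filter (fun p => p != skip)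
         if seeds ≤ (pre.length : Int) then
           ((PySem.List.slice pre none (some seeds)).foldl (bump 1) b0,
            (PySem.List.pyGet? pre (seeds - 1)).getD 0)
         else
           let cyc := (PySem.List.pyRange 0 16 1).filter (fun p => p != skip)
           let q := PySem.Int.floordiv (seeds - pre.length) cyc.length
           let r := PySem.Int.mod (seeds - pre.length) cyc.length
           let b1 := pre.foldl (bump 1) b0
           let b2 := cyc.foldl (bump q) b1
           let b3 := (PySem.List.slice cyc none (some r)).foldl (bump 1) b2
           (b3, if 0 < r then (PySem.List.pyGet? cyc (r - 1)).getD 0 else (PySem.List.pyGet? cyc (-1)).getD 0)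
       else (b0, mp)
     if pitGet sown.1 sown.2 = 1 ∧ lo ≤ sown.2 ∧ sown.2 ≤ hi then
       pitSet (pitSet sown.1 sp (pitGet sown.1 sp + pitGet sown.1 (sown.2 + ac))) (sown.2 + ac) 0
     else sown.1) := by
  dsimp only
  rw [hPdef]
  by_cases hs : 0 < pitGet board mp
  · have hb : pitGet board mp ≤ (Pf.length : Int) := by
      rcases hcase with h | ⟨hL, hv⟩
      · omega
      · omega
    rw [if_pos hs, if_pos hb, sowLin skip mp Pf hpathP _ _ hs hb]
  · rw [if_neg hs, sowLoop_zero skip _ mp _ hs]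

-- ===== VERDICT (by name: the statement is the Claim_ definition above) =====
theorem makeNextBoard_spec : Claim_equal_makeNextBoard := by
  intro fmt board mi _hdom hpre
  unfold Spec_makeNextBoard
  cases fmt
  · simp only [Pre_makeNextBoard, Bool.false_eq_true, false_and, true_and, if_false, if_true, eq_self_iff_true] at hpre
    obtain ⟨h0, h1, h2⟩ := hpre
    rcases h2 with hs | ⟨hL, hmi0, hmi6⟩ | ⟨hL, hbound, -⟩
    · exact coreZero 15 mi 0 6 7 8 board (by simp only [pitGet]; omega)
    · have h16 : board.length = 16 := by exact_mod_cast hL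
      interval_cases mi <;>
        exact wrapper 15 _ 0 6 7 8 _ _ rfl rfl (by decide) (by decide) (by decide) (by decide) (by decide) (by decide) (by decide) (by decide) board (Or.inr (Or.inr h16))
    · have hm0 : -14 ≤ mi := by omega
      have hm13 : mi ≤ 13 := by omega
      interval_cases mi <;>
        exact wrapperLin 15 _ 0 6 7 8 _ rfl (by decide) (by decide) board
          (Or.inr ⟨by omega, by simp only [pitGet, Bool.false_eq_true, if_false, if_true]; first | (split_ifs at hbound <;> omega) | omega⟩)
  · simp only [Pre_makeNextBoard, Bool.false_eq_true, false_and, true_and, if_false, if_true, eq_self_iff_true] at hpre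
    obtain ⟨h0, h1, h2⟩ := hpre
    rcases h2 with hs | ⟨hL, hmi0, hmi6⟩ | ⟨hL, hbound, -⟩
    · exact coreZero 7 (mi + 8) 8 14 15 (-8) board (by simp only [pitGet]; omega)
    · have h16 : board.length = 16 := by exact_mod_cast hL
      interval_cases mi <;>
        exact wrapper 7 _ 8 14 15 (-8) _ _ rfl rfl (by decide) (by decide) (by decide) (by decide) (by decide) (by decide) (by decide) (by decide) board (Or.inr (Or.inr h16))
    · have hm0 : -22 ≤ mi := by omega
      have hm5 : mi ≤ 5 := by omega
      interval_cases mi <;>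
        exact wrapperLin 7 _ 8 14 15 (-8) _ rfl (by decide) (by decide) board
          (Or.inr ⟨by omega, by simp only [pitGet, Bool.false_eq_true, if_false, if_true]; first | (split_ifs at hbound <;> omega) | omega⟩)
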